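-- pv_equiv track=rewrite | github.com/Hyeongseob91/research-vlm-based-document-parsing | evaluation/omnidocbench/extractor.py | _extract_markdown_tables
-- ===== SOURCE A (Python) =====
-- def _extract_markdown_tables(content: str) -> list[tuple[int, int, str]]:
--     """Find markdown table blocks (consecutive lines starting with |)."""
--     tables = []
--     lines = content.split("\n")
--     i = 0
--     pos = 0
--
--     while i < len(lines):
--         line = lines[i]
--         if line.strip().startswith("|") and line.strip().endswith("|"):
--             table_lines = []
--             start_pos = pos
--             while i < len(lines) and lines[i].strip().startswith("|"):
--                 table_lines.append(lines[i])
--                 pos += len(lines[i]) + 1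
--                 i += 1
--             if len(table_lines) >= 2:  # Need at least header + separator
--                 tables.append((start_pos, pos, "\n".join(table_lines)))
--         else:
--             pos += len(line) + 1
--             i += 1
--
--     return tables
-- ===== SOURCE B (Python) =====
-- def _extract_markdown_tables(content: str) -> list[tuple[int, int, str]]:
--     """Single pass over the lines with an open-block state instead of nested while loops."""
--     tables = []
--     pos = 0
--     current = None  # (start_pos, block_lines) while a table block is open
--     for line in content.split("\n"):
--         s = line.strip()
--         if current is not None and not s.startswith("|"):
--             start, block = current
--             if len(block) >= 2:
--                 tables.append((start, pos, "\n".join(block)))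
--             current = None
--         if current is not None:
--             current[1].append(line)
--         elif s.startswith("|") and s.endswith("|"):
--             current = (pos, [line])
--         pos += len(line) + 1
--     if current is not None and len(current[1]) >= 2:
--         start, block = current
--         tables.append((start, pos, "\n".join(block)))
--     return tables
-- ===== Notes on version B (the rewrite author's own statement) =====
-- stated objective: simpler
-- what changed: Replaced A's nested while loops with manual index bookkeeping by a single for-loop over the lines carrying an Option open-block state (start position + accumulated lines), flushed on block close and after the loop.
import Mathlib
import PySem

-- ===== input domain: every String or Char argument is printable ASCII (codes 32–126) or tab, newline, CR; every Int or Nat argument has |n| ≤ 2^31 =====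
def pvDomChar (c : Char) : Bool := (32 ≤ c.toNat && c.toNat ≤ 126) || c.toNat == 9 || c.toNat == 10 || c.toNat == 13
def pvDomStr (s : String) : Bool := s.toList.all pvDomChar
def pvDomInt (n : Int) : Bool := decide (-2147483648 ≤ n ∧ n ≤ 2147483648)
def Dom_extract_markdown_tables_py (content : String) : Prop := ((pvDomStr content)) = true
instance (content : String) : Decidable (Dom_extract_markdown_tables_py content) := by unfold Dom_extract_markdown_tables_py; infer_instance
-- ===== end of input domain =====

-- B re-implements A's nested while loops as ONE pass over the lines with an open-block state; same return value, no speed claim.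

-- line.strip().startswith("|") / .endswith("|") (shared predicates on a line's characters)
def pvStarts (l : List Char) : Bool := PySem.Chars.startswith (PySem.Chars.strip l) ['|']
def pvEnds (l : List Char) : Bool := PySem.Chars.endswith (PySem.Chars.strip l) ['|']

-- ===== PORT A =====
-- inner while: consume lines while strip().startswith("|"), accumulating pos; returns (table_lines, pos, remaining lines)
def pvTakeA : List (List Char) → Int → (List (List Char) × Int × List (List Char))
  | [], pos => ([], pos, [])
  | l :: rest, pos =>
    if pvStarts l then
      let r := pvTakeA rest (pos + l.length + 1)
      (l :: r.1, r.2.1, r.2.2)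
    else ([], pos, l :: rest)

theorem pvTakeA_rest_len : ∀ (ls : List (List Char)) (pos : Int), (pvTakeA ls pos).2.2.length ≤ ls.length := by
  intro ls
  induction ls with
  | nil => intro pos; simp [pvTakeA]
  | cons l rest ih =>
    intro pos
    by_cases h : pvStarts l = true
    · simpa [pvTakeA, h] using Nat.le_succ_of_le (ih (pos + l.length + 1))
    · simp [pvTakeA, h]

-- outer while over the lines
def pvLoopA : List (List Char) → Int → List (Int × Int × String) → List (Int × Int × String)
  | [], _, acc => acc
  | l :: rest, pos, acc =>
    if pvStarts l && pvEnds l then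
      let t := pvTakeA rest (pos + l.length + 1)
      pvLoopA t.2.2 t.2.1
        (if 2 ≤ (l :: t.1).length then acc ++ [(pos, t.2.1, String.ofList (PySem.Chars.join ['\n'] (l :: t.1)))] else acc)
    else pvLoopA rest (pos + l.length + 1) acc
termination_by ls => ls.length
decreasing_by
  · exact Nat.lt_succ_of_le (pvTakeA_rest_len rest (pos + l.length + 1))
  · simp

def extract_markdown_tables_py (content : String) : List (Int × Int × String) :=
  pvLoopA (PySem.Chars.splitOn content.toList ['\n']) 0 []

-- ===== PORT B =====
-- close an open block: emit it only when it has at least 2 lines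
def pvFlush (s : Int) (bl : List (List Char)) (pos : Int) : List (Int × Int × String) :=
  if 2 ≤ bl.length then [(s, pos, String.ofList (PySem.Chars.join ['\n'] bl))] else []

-- single for-loop; state = Option (start_pos, block_lines)
def pvLoopB : List (List Char) → Int → Option (Int × List (List Char)) → List (Int × Int × String) → List (Int × Int × String)
  | [], _, none, acc => acc
  | [], pos, some (s, bl), acc => acc ++ pvFlush s bl pos
  | l :: rest, pos, some (s, bl), acc =>
    if pvStarts l then pvLoopB rest (pos + l.length + 1) (some (s, bl ++ [l])) acc
    else pvLoopB rest (pos + l.length + 1) none (acc ++ pvFlush s bl pos)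
  | l :: rest, pos, none, acc =>
    if pvStarts l && pvEnds l then pvLoopB rest (pos + l.length + 1) (some (pos, [l])) acc
    else pvLoopB rest (pos + l.length + 1) none acc

def extract_markdown_tables_py_alt (content : String) : List (Int × Int × String) :=
  pvLoopB (PySem.Chars.splitOn content.toList ['\n']) 0 none []

-- ===== PRECONDITION & SPEC =====
def Spec_extract_markdown_tables_py (content : String) (out : List (Int × Int × String)) : Prop := out = extract_markdown_tables_py_alt content
instance (content : String) (out : List (Int × Int × String)) : Decidable (Spec_extract_markdown_tables_py content out) := by unfold Spec_extract_markdown_tables_py; infer_instance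

-- ===== CLAIM (what is proved, stated in full; the proofs are below) =====
def Claim_equal_extract_markdown_tables_py : Prop := ∀ (content : String), Dom_extract_markdown_tables_py content → Spec_extract_markdown_tables_py content (extract_markdown_tables_py content)

-- ===== LEMMAS AND PROOFS =====

-- the line A's inner while stops on does not start with '|'
theorem pvTakeA_rest_head : ∀ (ls : List (List Char)) (pos : Int) (l : List Char) (rest : List (List Char)),
    (pvTakeA ls pos).2.2 = l :: rest → pvStarts l = false := by
  intro ls
  induction ls with
  | nil => intro pos l rest h; simp [pvTakeA] at h
  | cons x xs ih =>
    intro pos l rest h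
    by_cases hx : pvStarts x = true
    · simp only [pvTakeA, hx, if_pos] at h
      exact ih _ l rest h
    · simp only [pvTakeA, hx, if_neg, Bool.not_eq_true] at h
      obtain ⟨h1, h2⟩ := List.cons.injEq .. ▸ h
      rw [← h1]; simpa using hx

-- running B in the OPEN state = A's inner while, then the close
theorem pvLoopB_open : ∀ (ls : List (List Char)) (pos s : Int) (bl : List (List Char)) (acc : List (Int × Int × String)),
    pvLoopB ls pos (some (s, bl)) acc =
      (match (pvTakeA ls pos).2.2 with
        | [] => acc ++ pvFlush s (bl ++ (pvTakeA ls pos).1) (pvTakeA ls pos).2.1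
        | l' :: rest' => pvLoopB rest' ((pvTakeA ls pos).2.1 + l'.length + 1) none (acc ++ pvFlush s (bl ++ (pvTakeA ls pos).1) (pvTakeA ls pos).2.1)) := by
  intro ls
  induction ls with
  | nil => intro pos s bl acc; simp [pvLoopB, pvTakeA]
  | cons l rest ih =>
    intro pos s bl acc
    by_cases h : pvStarts l = true
    · simp only [pvLoopB, h, if_pos, pvTakeA]
      rw [ih]
      simp
    · simp [pvLoopB, pvTakeA, h]

theorem pvLoop_eq : ∀ (n : Nat) (ls : List (List Char)) (pos : Int) (acc : List (Int × Int × String)),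
    ls.length ≤ n → pvLoopA ls pos acc = pvLoopB ls pos none acc := by
  intro n
  induction n with
  | zero =>
    intro ls pos acc h
    have : ls = [] := List.eq_nil_of_length_eq_zero (Nat.le_zero.mp h)
    subst this; simp [pvLoopA, pvLoopB]
  | succ n ih =>
    intro ls pos acc h
    match ls with
    | [] => simp [pvLoopA, pvLoopB]
    | l :: rest =>
      by_cases hc : (pvStarts l && pvEnds l) = true
      · have hs : pvStarts l = true := (Bool.and_eq_true ..).mp hc |>.1
        rw [pvLoopA]
        simp only [hc, if_pos]
        rw [show pvLoopB (l :: rest) pos none acc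
              = pvLoopB rest (pos + l.length + 1) (some (pos, [l])) acc by
            simp [pvLoopB, hc]]
        rw [pvLoopB_open]
        have hflush : ∀ (p : Int),
            (if 2 ≤ (l :: (pvTakeA rest (pos + l.length + 1)).1).length then
              acc ++ [(pos, p, String.ofList (PySem.Chars.join ['\n'] (l :: (pvTakeA rest (pos + l.length + 1)).1)))] else acc)
            = acc ++ pvFlush pos ([l] ++ (pvTakeA rest (pos + l.length + 1)).1) p := by
          intro p
          simp only [pvFlush, List.singleton_append]
          split <;> simp
        have hlen := pvTakeA_rest_len rest (pos + l.length + 1)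
        cases hrest : (pvTakeA rest (pos + l.length + 1)).2.2 with
        | nil =>
          simp only [pvLoopA]
          exact hflush _
        | cons l' rest' =>
          have hl' : pvStarts l' = false := pvTakeA_rest_head rest _ l' rest' hrest
          rw [pvLoopA, if_neg (by simp [hl']), hflush]
          apply ih
          rw [hrest] at hlen
          simp at h hlen ⊢
          omega
      · rw [pvLoopA, if_neg hc]
        rw [show pvLoopB (l :: rest) pos none acc
              = pvLoopB rest (pos + l.length + 1) none acc by
            simp [pvLoopB, hc]]
        exact ih rest _ acc (by simpa using Nat.le_of_succ_le_succ h)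

-- ===== VERDICT (by name: the statement is the Claim_ definition above) =====
theorem extract_markdown_tables_py_spec : Claim_equal_extract_markdown_tables_py := by
  intro content _
  unfold Spec_extract_markdown_tables_py extract_markdown_tables_py extract_markdown_tables_py_alt
  exact pvLoop_eq _ _ 0 [] (Nat.le_refl _)
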